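-- pv_equiv track=rewrite | github.com/alexandraback/datacollection | solutions_1483488_1/Python/pawko/C.py | build_tab
-- ===== SOURCE A (Python) =====
-- def build_tab(max_idx):
--     a = (max_idx+1)*[0]
--     for num in range(1, max_idx+1):
--         if a[num] > 0:
--             continue
--         cur=num
--         for nxt in gen_rotations_in_range(num, 1, max_idx):
--             a[cur] = nxt
--             cur = nxt
--         a[cur] = num
--     return a
--
-- def gen_rotations_in_range(num, mini, maxi):
--     for val in gen_rotations(num):
--         if mini <= val <= maxi:
--             yield val
--
-- def gen_rotations(num):
--     digits = [ch for ch in str(num)]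
--     for i in range(1, len(digits)):
--         if digits[i] != '0':
--             result = 0
--             for d in digits[i:]:
--                 result = 10*result + ord(d) - ord('0')
--             for d in digits[:i]:
--                 result = 10*result + ord(d) - ord('0')
--             if result == num:
--                 return
--             yield result
-- ===== SOURCE B (Python) =====
-- def build_tab(max_idx):
--     # Each entry computed independently: the successor of x under digit rotation,
--     # found arithmetically (divmod rotation) instead of by chaining rotation cycles.
--     return [_rot_succ(x, max_idx) if x >= 1 else 0 for x in range(max_idx + 1)]
--
-- def _rot_succ(x, max_idx):
--     n = len(str(x))
--     for i in range(1, n):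
--         p = 10 ** (n - i)
--         if (x // (p // 10)) % 10 != 0:
--             v = (x % p) * 10 ** i + x // p
--             if v == x:
--                 return x
--             if 1 <= v <= max_idx:
--                 return v
--     return x
-- ===== Notes on version B (the rewrite author's own statement) =====
-- stated objective: alternative
-- what changed: Replaces the visited-flag cycle-chaining over string-built rotations with an independent per-entry computation: each a[x] is the first admissible digit rotation of x, obtained arithmetically by divmod splitting instead of string slicing.
import Mathlib
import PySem

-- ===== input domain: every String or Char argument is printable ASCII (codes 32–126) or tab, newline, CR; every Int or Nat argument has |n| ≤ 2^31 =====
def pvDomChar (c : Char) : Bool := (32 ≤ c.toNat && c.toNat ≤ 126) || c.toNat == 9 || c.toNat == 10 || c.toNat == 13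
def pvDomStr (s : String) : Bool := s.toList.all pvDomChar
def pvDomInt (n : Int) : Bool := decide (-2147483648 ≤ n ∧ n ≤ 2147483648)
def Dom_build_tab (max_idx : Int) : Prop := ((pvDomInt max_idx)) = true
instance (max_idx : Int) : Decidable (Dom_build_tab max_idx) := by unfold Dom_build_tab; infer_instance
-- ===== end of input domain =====

-- B replaces A's visited-flag cycle-chaining over string-built rotations by an independent
-- per-entry computation (first admissible digit rotation of each x, found by divmod arithmetic).


-- ===== PORT A =====
-- step of A's inner digit loops: result = 10*result + ord(d) - ord('0')
def pvDigStep (r : Int) (d : Char) : Int := 10 * r + (d.toNat : Int) - 48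

-- gen_rotations' loop over i in range(1, len(digits)); the generator's early `return`
-- on result == num becomes the empty tail.
def pvGenRotGo (digits : List Char) (num : Int) (i : Nat) : List Int :=
  if h : i < digits.length then
    if digits[i] ≠ '0' then
      let r1 := (digits.drop i).foldl pvDigStep 0
      let result := (digits.take i).foldl pvDigStep r1
      if result = num then []
      else result :: pvGenRotGo digits num (i + 1)
    else pvGenRotGo digits num (i + 1)
  else []
termination_by digits.length - i

def pvGenRotations (num : Int) : List Int :=
  pvGenRotGo (PySem.Int.toChars num) num 1

def pvGenRotationsInRange (num mini maxi : Int) : List Int :=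
  (pvGenRotations num).filter (fun v => decide (mini ≤ v) && decide (v ≤ maxi))

-- build_tab: a = (max_idx+1)*[0]; for num in range(1, max_idx+1): …
-- Python list assignment a[cur] = nxt is List.set at cur.toNat: cur is always in
-- [1, max_idx] here, where both coincide exactly with Python's semantics.
def build_tab (max_idx : Int) : List Int :=
  let a0 : List Int := List.replicate (max_idx + 1).toNat 0
  (PySem.List.pyRange 1 (max_idx + 1)).foldl (fun a num =>
    if PySem.List.pyGetD a num 0 > 0 then a
    else
      let st := (pvGenRotationsInRange num 1 max_idx).foldl
        (fun (st : List Int × Int) nxt => (st.1.set st.2.toNat nxt, nxt)) (a, num)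
      st.1.set st.2.toNat num) a0

-- ===== PORT B =====
-- _rot_succ's loop over i in range(1, n), arithmetic digit rotation by divmod.
def pvRotSuccGo (x maxIdx : Int) (n : Nat) (i : Nat) : Int :=
  if i < n then
    let p : Int := 10 ^ (n - i)
    if PySem.Int.mod (PySem.Int.floordiv x (PySem.Int.floordiv p 10)) 10 ≠ 0 then
      let v := PySem.Int.mod x p * 10 ^ i + PySem.Int.floordiv x p
      if v = x then x
      else if 1 ≤ v ∧ v ≤ maxIdx then v
      else pvRotSuccGo x maxIdx n (i + 1)
    else pvRotSuccGo x maxIdx n (i + 1)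
  else x
termination_by n - i

def pvRotSucc (x maxIdx : Int) : Int :=
  pvRotSuccGo x maxIdx (PySem.Int.toChars x).length 1

def build_tab_alt (max_idx : Int) : List Int :=
  (PySem.List.pyRange 0 (max_idx + 1)).map (fun x => if 1 ≤ x then pvRotSucc x max_idx else 0)

-- ===== PRECONDITION & SPEC =====
def Spec_build_tab (max_idx : Int) (out : List Int) : Prop := out = build_tab_alt max_idx
instance (max_idx : Int) (out : List Int) : Decidable (Spec_build_tab max_idx out) := by unfold Spec_build_tab; infer_instance

-- ===== CLAIM (what is proved, stated in full; the proofs are below) =====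
def Claim_equal_build_tab : Prop := ∀ (max_idx : Int), Dom_build_tab max_idx → Spec_build_tab max_idx (build_tab max_idx)

-- ===== LEMMAS AND PROOFS =====

abbrev pvIsDig (c : Char) : Prop := c ∈ ['0','1','2','3','4','5','6','7','8','9']


def pvVn (cs : List Char) : Nat := cs.foldl (fun r c => 10 * r + (c.toNat - 48)) 0

def pvRep (m : Nat) : List Char :=
  if h : m < 10 then [Nat.digitChar m]
  else pvRep (m / 10) ++ [Nat.digitChar (m % 10)]
decreasing_by exact Nat.div_lt_self (by omega) (by omega)

theorem pvToDigitsCore_eq (f : Nat) : ∀ n acc, n < f →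
    Nat.toDigitsCore 10 f n acc = pvRep n ++ acc := by
  induction f with
  | zero => intro n acc h; omega
  | succ f ih =>
    intro n acc h
    rw [Nat.toDigitsCore]
    by_cases h10 : n < 10
    · have : n / 10 = 0 := Nat.div_eq_of_lt h10
      simp [this, pvRep, h10, Nat.mod_eq_of_lt h10]
    · have hne : ¬ n / 10 = 0 := by
        intro e; exact h10 (by omega)  -- n/10 = 0 → n < 10
      simp only [hne, if_false]
      rw [ih (n / 10) _ (by
        have := Nat.div_lt_self (by omega : 0 < n) (by omega : 1 < 10)
        omega)]
      conv_rhs => rw [pvRep]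
      simp [h10]
  termination_by f

theorem pvToChars_eq (x : Int) (hx : 0 ≤ x) : PySem.Int.toChars x = pvRep x.toNat := by
  unfold PySem.Int.toChars
  rw [if_neg (by omega)]
  unfold Nat.toDigits
  rw [pvToDigitsCore_eq _ _ _ (Nat.lt_succ_self _), List.append_nil]

theorem pvRep_ne_nil (m : Nat) : pvRep m ≠ [] := by
  rw [pvRep]; split <;> simp

theorem pvDigitChar_mem (k : Nat) (h : k < 10) : pvIsDig (Nat.digitChar k) := by
  interval_cases k <;> decide

theorem pvRep_digs (m : Nat) : ∀ c ∈ pvRep m, pvIsDig c := by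
  induction m using pvRep.induct with
  | case1 m h =>
    rw [pvRep, dif_pos h]
    intro c hc
    simp at hc
    subst hc
    exact pvDigitChar_mem m h
  | case2 m h ih =>
    rw [pvRep, dif_neg h]
    intro c hc
    rcases List.mem_append.1 hc with h1 | h2
    · exact ih c h1
    · simp at h2; subst h2; exact pvDigitChar_mem _ (Nat.mod_lt _ (by omega))

theorem pvRep_head (m : Nat) (hm : 1 ≤ m) : (pvRep m).head? ≠ some '0' := by
  induction m using pvRep.induct with
  | case1 m h =>
    rw [pvRep, dif_pos h]
    intro hc
    simp at hc
    interval_cases m <;> simp_all <;> exact absurd hc (by decide)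
  | case2 m h ih =>
    rw [pvRep, dif_neg h]
    intro hc
    have hne := pvRep_ne_nil (m / 10)
    rw [List.head?_append_of_ne_nil _ hne] at hc
    exact ih (by omega) hc

theorem pvVn_aux (bs : List Char) : ∀ r : Nat,
    bs.foldl (fun r c => 10 * r + (c.toNat - 48)) r = r * 10 ^ bs.length + pvVn bs := by
  induction bs with
  | nil => intro r; simp [pvVn]
  | cons b bs ih =>
    intro r
    rw [List.foldl_cons, ih]
    conv_rhs => rw [pvVn, List.foldl_cons]
    rw [ih (10 * 0 + (b.toNat - 48))]
    simp only [List.length_cons]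
    ring

theorem pvVn_cons (b : Char) (bs : List Char) :
    pvVn (b :: bs) = (b.toNat - 48) * 10 ^ bs.length + pvVn bs := by
  rw [pvVn, List.foldl_cons, pvVn_aux]
  ring_nf

theorem pvVn_append (as bs : List Char) :
    pvVn (as ++ bs) = pvVn as * 10 ^ bs.length + pvVn bs := by
  rw [pvVn, List.foldl_append, ← pvVn, pvVn_aux]

theorem pvDig_le (c : Char) (hc : pvIsDig c) : 48 ≤ c.toNat ∧ c.toNat ≤ 57 := by
  simp only [pvIsDig, List.mem_cons, List.not_mem_nil, or_false] at hc
  rcases hc with h|h|h|h|h|h|h|h|h|h <;> subst h <;> decide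

theorem pvVn_lt (cs : List Char) (h : ∀ c ∈ cs, pvIsDig c) : pvVn cs < 10 ^ cs.length := by
  induction cs with
  | nil => simp [pvVn]
  | cons c t ih =>
    rw [pvVn_cons]
    have h1 := pvDig_le c (h c (by simp))
    have h2 := ih (fun x hx => h x (by simp [hx]))
    have : c.toNat - 48 ≤ 9 := by omega
    calc (c.toNat - 48) * 10 ^ t.length + pvVn t
        < (c.toNat - 48) * 10 ^ t.length + 10 ^ t.length := by omega
      _ ≤ 9 * 10 ^ t.length + 10 ^ t.length := by
          have := Nat.mul_le_mul_right (10 ^ t.length) this; omega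
      _ = 10 ^ (t.length + 1) := by ring
      _ = 10 ^ (c :: t).length := by simp

theorem pvVn_lower (c : Char) (t : List Char) (hc : pvIsDig c) (h0 : c ≠ '0') :
    10 ^ t.length ≤ pvVn (c :: t) := by
  rw [pvVn_cons]
  have : 1 ≤ c.toNat - 48 := by
    simp only [pvIsDig, List.mem_cons, List.not_mem_nil, or_false] at hc
    rcases hc with h|h|h|h|h|h|h|h|h|h <;> subst h <;> first | (exact absurd rfl h0) | decide
  have := Nat.mul_le_mul_right (10 ^ t.length) this
  omega

theorem pvVn_pos (c : Char) (t : List Char) (hc : pvIsDig c) (h0 : c ≠ '0') :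
    1 ≤ pvVn (c :: t) := by
  have := pvVn_lower c t hc h0
  have : 1 ≤ 10 ^ t.length := Nat.one_le_pow _ _ (by omega)
  omega

theorem pvDigitChar_inv (c : Char) (hc : pvIsDig c) : Nat.digitChar (c.toNat - 48) = c := by
  simp only [pvIsDig, List.mem_cons, List.not_mem_nil, or_false] at hc
  rcases hc with h|h|h|h|h|h|h|h|h|h <;> subst h <;> decide

theorem pvDigitChar_val (k : Nat) (h : k < 10) : (Nat.digitChar k).toNat - 48 = k := by
  interval_cases k <;> decide

theorem pvVn_rep (m : Nat) : pvVn (pvRep m) = m := by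
  induction m using pvRep.induct with
  | case1 m h =>
    rw [pvRep, dif_pos h]
    simp [pvVn_cons, pvVn, pvDigitChar_val m h]
  | case2 m h ih =>
    rw [pvRep, dif_neg h]
    rw [pvVn_append, ih]
    simp [pvVn_cons, pvVn, pvDigitChar_val (m % 10) (Nat.mod_lt _ (by omega))]
    omega

theorem pvRep_vn (cs : List Char) (hne : cs ≠ []) (hd : ∀ c ∈ cs, pvIsDig c)
    (h0 : cs.head? ≠ some '0') : pvRep (pvVn cs) = cs := by
  induction cs using List.reverseRecOn with
  | nil => exact absurd rfl hne
  | append_singleton ds c ih =>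
    rcases List.eq_nil_or_concat ds with h | _
    · subst h
      simp only [List.nil_append]
      have hcd := hd c (by simp)
      have hc0 : c ≠ '0' := by
        intro e; subst e; simp at h0
      have h1 := pvDig_le c hcd
      rw [pvVn_cons]
      simp [pvVn]
      rw [pvRep, dif_pos (by omega)]
      rw [pvDigitChar_inv c hcd]
    · have hdne : ds ≠ [] := by rcases ‹∃ _, _› with ⟨l, b, e⟩; subst e; simp
      have hds : ∀ x ∈ ds, pvIsDig x := fun x hx => hd x (by simp [hx])
      have hcd := hd c (by simp)
      have hh0 : ds.head? ≠ some '0' := by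
        rwa [List.head?_append_of_ne_nil _ hdne] at h0
      obtain ⟨d0, t0, e0⟩ := List.exists_cons_of_ne_nil hdne
      have hpos : 1 ≤ pvVn ds := by
        subst e0
        exact pvVn_pos d0 t0 (hds d0 (by simp)) (by simp at hh0; exact hh0)
      have h1 := pvDig_le c hcd
      rw [pvVn_append]
      simp only [List.length_singleton, pow_one]
      have hvc : pvVn [c] = c.toNat - 48 := by simp [pvVn]
      rw [hvc]
      rw [pvRep, dif_neg (by omega)]
      have e1 : (pvVn ds * 10 + (c.toNat - 48)) / 10 = pvVn ds := by omega
      have e2 : (pvVn ds * 10 + (c.toNat - 48)) % 10 = c.toNat - 48 := by omega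
      rw [e1, e2, ih hdne hds hh0, pvDigitChar_inv c hcd]

theorem pvFoldI_eq (cs : List Char) (hd : ∀ c ∈ cs, pvIsDig c) : ∀ r : Nat,
    cs.foldl pvDigStep (r : Int) = ((cs.foldl (fun r c => 10 * r + (c.toNat - 48)) r : Nat) : Int) := by
  induction cs with
  | nil => intro r; simp
  | cons c t ih =>
    intro r
    simp only [List.foldl_cons]
    have h1 := pvDig_le c (hd c (by simp))
    have e : pvDigStep (r : Int) c = ((10 * r + (c.toNat - 48) : Nat) : Int) := by
      unfold pvDigStep; push_cast [Nat.cast_sub (by omega : 48 ≤ c.toNat)]; ring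
    rw [e, ih (fun x hx => hd x (by simp [hx]))]

structure PvCtx where
  cs : List Char
  d : Nat
  maxIdx : Int
  ne : cs ≠ []
  digs : ∀ c ∈ cs, pvIsDig c
  hd0 : cs.head? ≠ some '0'
  d_pos : 1 ≤ d
  d_le : d ≤ cs.length
  rot_d : cs.rotate d = cs
  d_min : ∀ i, 1 ≤ i → i < d → cs.rotate i ≠ cs
  num_le : (pvVn cs : Int) ≤ maxIdx

def PvCtx.n (C : PvCtx) : Nat := C.cs.length

def PvCtx.num (C : PvCtx) : Nat := pvVn C.cs

def PvCtx.V (C : PvCtx) (i : Nat) : Nat := pvVn (C.cs.rotate i)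

def PvCtx.dig (C : PvCtx) (i : Nat) : Option Char := (C.cs.rotate i).head?

def PvCtx.Good (C : PvCtx) (q : Nat) : Prop := C.dig q ≠ some '0' ∧ (C.V q : Int) ≤ C.maxIdx

def PvCtx.goodB (C : PvCtx) (q : Nat) : Bool :=
  decide (C.dig q ≠ some '0') && decide ((C.V q : Int) ≤ C.maxIdx)

@[simp] theorem pvGoodB_iff (C : PvCtx) (q : Nat) : C.goodB q = true ↔ C.Good q := by
  simp [PvCtx.goodB, PvCtx.Good]


theorem pvCtx_exists (cs : List Char) (maxIdx : Int) (ne : cs ≠ [])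
    (digs : ∀ c ∈ cs, pvIsDig c) (hd0 : cs.head? ≠ some '0')
    (hle : (pvVn cs : Int) ≤ maxIdx) :
    ∃ C : PvCtx, C.cs = cs ∧ C.maxIdx = maxIdx := by
  have hex : ∃ i, 1 ≤ i ∧ cs.rotate i = cs :=
    ⟨cs.length, by
      constructor
      · have := List.length_pos_iff.2 ne; omega
      · exact List.rotate_length cs⟩
  classical
  let d := Nat.find hex
  have hspec := Nat.find_spec hex
  refine ⟨⟨cs, d, maxIdx, ne, digs, hd0, hspec.1, ?_, hspec.2, ?_, hle⟩, rfl, rfl⟩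
  · exact Nat.find_min' hex ⟨by have := List.length_pos_iff.2 ne; omega, List.rotate_length cs⟩
  · intro i h1 h2 hrot
    exact absurd ⟨h1, hrot⟩ (Nat.find_min hex h2)

theorem pvN_pos (C : PvCtx) : 1 ≤ C.n := by
  have := List.length_pos_iff.2 C.ne; exact this

theorem pvRot_add_d (C : PvCtx) (i : Nat) : C.cs.rotate (i + C.d) = C.cs.rotate i := by
  rw [Nat.add_comm, ← List.rotate_rotate, C.rot_d]

theorem pvRot_reduce (C : PvCtx) (q : Nat) : C.cs.rotate q = C.cs.rotate (q % C.d) := by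
  induction q using Nat.strong_induction_on with
  | _ q ih =>
    by_cases h : q < C.d
    · rw [Nat.mod_eq_of_lt h]
    · have h1 : q = (q - C.d) + C.d := by have := C.d_pos; omega
      rw [h1, pvRot_add_d, ih _ (by have := C.d_pos; omega), Nat.add_mod_right]

theorem pvRot_cancel (C : PvCtx) (a b : Nat) (hab : a ≤ b) (han : a ≤ C.n) :
    C.cs.rotate a = C.cs.rotate b → C.cs.rotate (b - a) = C.cs := by
  intro e
  have hn : C.n = C.cs.length := rfl
  calc C.cs.rotate (b - a)
      = (C.cs.rotate C.n).rotate (b - a) := by rw [hn, List.rotate_length]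
    _ = C.cs.rotate (C.n + (b - a)) := List.rotate_rotate _ _ _
    _ = C.cs.rotate (b + (C.n - a)) := by congr 1; omega
    _ = (C.cs.rotate b).rotate (C.n - a) := (List.rotate_rotate _ _ _).symm
    _ = (C.cs.rotate a).rotate (C.n - a) := by rw [e]
    _ = C.cs.rotate (a + (C.n - a)) := List.rotate_rotate _ _ _
    _ = C.cs.rotate C.n := by congr 1; omega
    _ = C.cs := by rw [hn, List.rotate_length]

theorem pvRot_inj (C : PvCtx) (a b : Nat) (ha : a < C.d) (hb : b < C.d)
    (e : C.cs.rotate a = C.cs.rotate b) : a = b := by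
  have hn : C.n = C.cs.length := rfl
  have hdle := C.d_le
  rcases Nat.lt_trichotomy a b with h | h | h
  · exact absurd (pvRot_cancel C a b (by omega) (by omega) e)
      (C.d_min (b - a) (by omega) (by omega))
  · exact h
  · exact absurd (pvRot_cancel C b a (by omega) (by omega) e.symm)
      (C.d_min (a - b) (by omega) (by omega))

theorem pvRot_digs (C : PvCtx) (i : Nat) : ∀ c ∈ C.cs.rotate i, pvIsDig c := by
  intro c hc
  exact C.digs c ((List.mem_rotate).1 hc)

theorem pvRot_ne (C : PvCtx) (i : Nat) : C.cs.rotate i ≠ [] := by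
  intro h
  have := congrArg List.length h
  simp at this
  exact C.ne this

theorem pvV_zero (C : PvCtx) : C.V 0 = C.num := by
  unfold PvCtx.V PvCtx.num; rw [List.rotate_zero]

theorem pvV_d (C : PvCtx) : C.V C.d = C.num := by
  unfold PvCtx.V PvCtx.num; rw [C.rot_d]

theorem pvDig_zero (C : PvCtx) : C.dig 0 ≠ some '0' := by
  unfold PvCtx.dig; rw [List.rotate_zero]; exact C.hd0

theorem pvDig_d (C : PvCtx) : C.dig C.d ≠ some '0' := by
  unfold PvCtx.dig; rw [C.rot_d]; exact C.hd0

theorem pvRot_cons (C : PvCtx) (i : Nat) :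
    ∃ c t, C.cs.rotate i = c :: t ∧ t.length = C.n - 1 ∧ pvIsDig c ∧ (∀ x ∈ t, pvIsDig x) ∧
      C.dig i = some c := by
  obtain ⟨c, t, e⟩ := List.exists_cons_of_ne_nil (pvRot_ne C i)
  refine ⟨c, t, e, ?_, ?_, ?_, ?_⟩
  · have := List.length_rotate C.cs i
    rw [e] at this; simp at this
    have hn : C.n = C.cs.length := rfl
    omega
  · exact pvRot_digs C i c (by rw [e]; simp)
  · intro x hx; exact pvRot_digs C i x (by rw [e]; simp [hx])
  · unfold PvCtx.dig; rw [e]; rfl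

theorem pvV_head_zero_lt (C : PvCtx) (i : Nat) (h : C.dig i = some '0') :
    C.V i < 10 ^ (C.n - 1) := by
  obtain ⟨c, t, e, hlen, hc, ht, hd⟩ := pvRot_cons C i
  rw [hd] at h
  have hc0 : c = '0' := by injection h
  unfold PvCtx.V
  rw [e, pvVn_cons, hc0]
  have h1 : ('0'.toNat - 48 : Nat) = 0 := by decide
  rw [h1, ← hlen]
  have := pvVn_lt t ht
  omega

theorem pvNum_lower (C : PvCtx) : 10 ^ (C.n - 1) ≤ C.num := by
  obtain ⟨c, t, e⟩ := List.exists_cons_of_ne_nil C.ne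
  have hc : pvIsDig c := C.digs c (by rw [e]; simp)
  have h0 : c ≠ '0' := by
    intro h; subst h
    apply C.hd0
    rw [e]; rfl
  have := pvVn_lower c t hc h0
  unfold PvCtx.num
  rw [e]
  have hlen : t.length = C.n - 1 := by
    have hn : C.n = C.cs.length := rfl
    rw [hn, e]; simp
  rw [← hlen]
  exact this

theorem pvV_inj (C : PvCtx) (a b : Nat) (hda : C.dig a ≠ some '0') (hdb : C.dig b ≠ some '0')
    (e : C.V a = C.V b) : C.cs.rotate a = C.cs.rotate b := by
  obtain ⟨ca, ta, ea, _, hca, hta, hdga⟩ := pvRot_cons C a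
  obtain ⟨cb, tb, eb, _, hcb, htb, hdgb⟩ := pvRot_cons C b
  have hca0 : ca ≠ '0' := by intro h; subst h; exact hda hdga
  have hcb0 : cb ≠ '0' := by intro h; subst h; exact hdb hdgb
  have r1 : pvRep (C.V a) = C.cs.rotate a := by
    unfold PvCtx.V
    exact pvRep_vn _ (pvRot_ne C a) (pvRot_digs C a) (by rw [ea]; simpa using hca0)
  have r2 : pvRep (C.V b) = C.cs.rotate b := by
    unfold PvCtx.V
    exact pvRep_vn _ (pvRot_ne C b) (pvRot_digs C b) (by rw [eb]; simpa using hcb0)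
  rw [← r1, ← r2, e]

theorem pvV_ne_num (C : PvCtx) (i : Nat) (h1 : 1 ≤ i) (h2 : i < C.d) : C.V i ≠ C.num := by
  intro e
  by_cases hd : C.dig i = some '0'
  · have := pvV_head_zero_lt C i hd
    have := pvNum_lower C
    omega
  · have := pvV_inj C i 0 hd (pvDig_zero C) (by rw [e, ← pvV_zero C])
    rw [List.rotate_zero] at this
    exact C.d_min i h1 h2 this

theorem pvV_pos (C : PvCtx) (i : Nat) (h : C.dig i ≠ some '0') : 1 ≤ C.V i := by
  obtain ⟨c, t, e, _, hc, _, hdg⟩ := pvRot_cons C i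
  have hc0 : c ≠ '0' := by intro hh; subst hh; exact h hdg
  unfold PvCtx.V
  rw [e]
  exact pvVn_pos c t hc hc0

-- digit value at head of a rotation, as the arithmetic digit test sees it

theorem pvDig_ne_zero_iff (C : PvCtx) (i : Nat) (c : Char) (h : C.dig i = some c) :
    (c.toNat - 48 ≠ 0) ↔ C.dig i ≠ some '0' := by
  obtain ⟨c', t, e, _, hc', _, hdg⟩ := pvRot_cons C i
  rw [h] at hdg
  have : c = c' := by injection hdg
  subst this
  constructor
  · intro hv hz
    rw [h] at hz
    have : c = '0' := by injection hz
    subst this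
    exact hv (by decide)
  · intro hz hv
    apply hz
    rw [h]
    have := pvDig_le c hc'
    have : c.toNat = 48 := by omega
    simp only [pvIsDig, List.mem_cons, List.not_mem_nil, or_false] at hc'
    rcases hc' with hh|hh|hh|hh|hh|hh|hh|hh|hh|hh <;> subst hh <;> first | rfl | (exfalso; revert this; decide)

theorem pvRotHead (l : List Char) (i : Nat) (h : i < l.length) :
    (l.rotate i).head? = some (l[i]'h) := by
  have h0 : 0 < (l.rotate i).length := by
    rw [List.length_rotate]; omega
  rw [List.head?_eq_getElem?, List.getElem?_eq_getElem h0, List.getElem_rotate]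
  simp [Nat.mod_eq_of_lt h]

theorem pvDig_head (C : PvCtx) (i : Nat) (h : i < C.n) : C.dig i = some (C.cs[i]'h) :=
  pvRotHead C.cs i h

-- A's double fold at split point i computes the rotation value

theorem pvAVal (C : PvCtx) (i : Nat) (h : i ≤ C.n) :
    (C.cs.take i).foldl pvDigStep ((C.cs.drop i).foldl pvDigStep 0) = (C.V i : Int) := by
  have hrot : C.cs.rotate i = C.cs.drop i ++ C.cs.take i := List.rotate_eq_drop_append_take h
  have hdigs : ∀ c ∈ C.cs.drop i ++ C.cs.take i, pvIsDig c := by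
    rw [← hrot]; exact pvRot_digs C i
  have e0 : ((0 : Nat) : Int) = (0 : Int) := rfl
  calc (C.cs.take i).foldl pvDigStep ((C.cs.drop i).foldl pvDigStep 0)
      = (C.cs.drop i ++ C.cs.take i).foldl pvDigStep 0 := (List.foldl_append ..).symm
    _ = ((pvVn (C.cs.drop i ++ C.cs.take i) : Nat) : Int) := by
        rw [← e0, pvFoldI_eq _ hdigs 0]; rfl
    _ = (C.V i : Int) := by unfold PvCtx.V; rw [hrot]

theorem pvGenRotGo_eq (C : PvCtx) : ∀ k i, C.d - i = k → 1 ≤ i → i ≤ C.d →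
    pvGenRotGo C.cs (C.num : Int) i
      = ((List.range' i (C.d - i)).filter (fun j => decide (C.dig j ≠ some '0'))).map
          (fun j => (C.V j : Int)) := by
  have hdn := C.d_le
  have hn : C.n = C.cs.length := rfl
  intro k
  induction k using Nat.strong_induction_on with
  | _ k ih =>
    intro i hk h1 h2
    rcases Nat.eq_or_lt_of_le h2 with he | hlt
    · -- i = d
      rw [show C.d - i = 0 from by omega, List.range'_zero, List.filter_nil, List.map_nil]
      rw [pvGenRotGo]
      by_cases hin : i < C.cs.length
      · rw [dif_pos hin]
        have hdig : C.cs[i] ≠ '0' := by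
          have hd := pvDig_d C
          rw [← he] at hd
          rw [pvDig_head C i (by rw [← hn] at hin; exact hin)] at hd
          intro e; exact hd (congrArg some e)
        rw [if_pos (by simpa using hdig)]
        have hval := pvAVal C i (by omega)
        simp only [hval]
        rw [if_pos (by rw [he, pvV_d C])]
      · rw [dif_neg hin]
    · -- i < d
      have hin : i < C.cs.length := by omega
      have hrange : List.range' i (C.d - i) = i :: List.range' (i+1) (C.d - (i+1)) := by
        have : C.d - i = (C.d - (i+1)) + 1 := by omega
        rw [this, List.range'_succ]
      rw [pvGenRotGo, dif_pos hin, hrange]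
      have hdigeq := pvDig_head C i (by rw [← hn] at hin; exact hin)
      by_cases hdig : C.cs[i] = '0'
      · rw [if_neg (by simpa using hdig)]
        rw [List.filter_cons_of_neg (by simp [hdigeq]; exact hdig)]
        exact ih (C.d - (i+1)) (by omega) (i+1) rfl (by omega) (by omega)
      · rw [if_pos (by simpa using hdig)]
        have hval := pvAVal C i (by omega)
        simp only [hval]
        have hne : ¬ ((C.V i : Int) = (C.num : Int)) := by
          intro e
          exact pvV_ne_num C i h1 hlt (by exact_mod_cast e)
        rw [if_neg hne]
        rw [List.filter_cons_of_pos (by simp [hdigeq]; exact hdig)]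
        rw [List.map_cons]
        congr 1
        exact ih (C.d - (i+1)) (by omega) (i+1) rfl (by omega) (by omega)

theorem pvToChars_cs (C : PvCtx) : PySem.Int.toChars (C.num : Int) = C.cs := by
  rw [pvToChars_eq _ (by positivity)]
  have : ((C.num : Int)).toNat = C.num := rfl
  rw [this]
  exact pvRep_vn C.cs C.ne C.digs C.hd0

theorem pvChainList_eq (C : PvCtx) :
    pvGenRotationsInRange (C.num : Int) 1 C.maxIdx
      = ((List.range' 1 (C.d - 1)).filter (fun j => C.goodB j)).map
          (fun j => (C.V j : Int)) := by
  unfold pvGenRotationsInRange pvGenRotations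
  rw [pvToChars_cs C]
  rw [pvGenRotGo_eq C (C.d - 1) 1 rfl (le_refl 1) C.d_pos]
  rw [List.filter_map]
  rw [List.filter_filter]
  apply congrArg
  apply List.filter_congr
  intro j hj
  have hj1 : 1 ≤ j := (List.mem_range'_1.1 hj).1
  simp only [Function.comp]
  by_cases hd : C.dig j = some '0'
  · simp [hd, PvCtx.goodB]
  · have hpos := pvV_pos C j hd
    simp only [PvCtx.goodB]
    by_cases hle : (C.V j : Int) ≤ C.maxIdx
    · simp [hd, hle]
      omega
    · simp [hd, hle]

theorem pvVn_split (ds : List Char) (hd : ∀ c ∈ ds, pvIsDig c) (i : Nat) (h : i ≤ ds.length) :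
    pvVn ds / 10 ^ (ds.length - i) = pvVn (ds.take i) ∧
    pvVn ds % 10 ^ (ds.length - i) = pvVn (ds.drop i) := by
  have e : ds = ds.take i ++ ds.drop i := (List.take_append_drop i ds).symm
  have hlen : (ds.drop i).length = ds.length - i := List.length_drop ..
  have hlt : pvVn (ds.drop i) < 10 ^ (ds.length - i) := by
    rw [← hlen]
    exact pvVn_lt _ (fun c hc => hd c (by rw [e]; exact List.mem_append_right _ hc))
  have hv : pvVn ds = pvVn (ds.take i) * 10 ^ (ds.length - i) + pvVn (ds.drop i) := by
    conv_lhs => rw [e]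
    rw [pvVn_append, hlen]
  constructor
  · rw [hv, Nat.add_comm, Nat.add_mul_div_right _ _ (by positivity : (0:Nat) < 10 ^ (ds.length - i)),
      Nat.div_eq_of_lt hlt, Nat.zero_add]
  · rw [hv, Nat.add_comm, Nat.add_mul_mod_self_right, Nat.mod_eq_of_lt hlt]

-- B2: the tested digit of the arithmetic rotation

theorem pvVn_digit (ds : List Char) (hd : ∀ c ∈ ds, pvIsDig c) (i : Nat) (h : i < ds.length) :
    pvVn ds / 10 ^ (ds.length - i - 1) % 10 = (ds[i]'h).toNat - 48 := by
  have h1 := (pvVn_split ds hd (i+1) (by omega)).1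
  have e : ds.length - (i + 1) = ds.length - i - 1 := by omega
  rw [e] at h1
  rw [h1]
  have e2 : ds.take (i+1) = ds.take i ++ [ds[i]'h] := List.take_succ_eq_append_getElem h
  rw [e2, pvVn_append]
  have hdig := pvDig_le (ds[i]'h) (hd _ (List.getElem_mem h))
  simp only [List.length_singleton, pow_one]
  have : pvVn [ds[i]'h] = (ds[i]'h).toNat - 48 := by simp [pvVn]
  rw [this]
  omega

theorem pvFD10 (a : Nat) : PySem.Int.floordiv (a : Int) 10 = ((a / 10 : Nat) : Int) := by
  exact_mod_cast PySem.Int.floordiv_natCast a 10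

theorem pvMod10C (a : Nat) : PySem.Int.mod (a : Int) 10 = ((a % 10 : Nat) : Int) := by
  exact_mod_cast PySem.Int.mod_natCast a 10

theorem pvDsFacts (C : PvCtx) (p : Nat) :
    (C.cs.rotate p).length = C.n ∧ (∀ c ∈ C.cs.rotate p, pvIsDig c) ∧
      pvVn (C.cs.rotate p) = C.V p :=
  ⟨List.length_rotate .., pvRot_digs C p, rfl⟩

theorem pvDigitTest (C : PvCtx) (p i : Nat) (h : i < C.n) :
    ((PySem.Int.mod (PySem.Int.floordiv (C.V p : Int)
        (PySem.Int.floordiv ((10 : Int) ^ (C.n - i)) 10)) 10 ≠ 0)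
      ↔ C.dig (p + i) ≠ some '0') := by
  obtain ⟨hlen, hds, hvds⟩ := pvDsFacts C p
  have e1 : ((10 : Int) ^ (C.n - i)) = ((10 ^ (C.n - i) : Nat) : Int) := by norm_cast
  have e2 : (10 : Nat) ^ (C.n - i) / 10 = 10 ^ (C.n - i - 1) := by
    have : (10 : Nat) ^ (C.n - i) = 10 ^ (C.n - i - 1) * 10 := by
      rw [← pow_succ]; congr 1; omega
    rw [this, Nat.mul_div_cancel _ (by norm_num)]
  rw [e1, pvFD10, e2, PySem.Int.floordiv_natCast, pvMod10C]
  have hi : i < (C.cs.rotate p).length := by omega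
  have hd := pvVn_digit (C.cs.rotate p) hds i hi
  rw [hlen, hvds] at hd
  rw [hd]
  have hdig : C.dig (p + i) = some ((C.cs.rotate p)[i]'hi) := by
    unfold PvCtx.dig
    rw [← List.rotate_rotate]
    exact pvRotHead _ i hi
  rw [← pvDig_ne_zero_iff C (p + i) _ hdig]
  exact_mod_cast Iff.rfl

theorem pvArithVal (C : PvCtx) (p i : Nat) (h : i ≤ C.n) :
    PySem.Int.mod (C.V p : Int) ((10 : Int) ^ (C.n - i)) * (10 : Int) ^ i
      + PySem.Int.floordiv (C.V p : Int) ((10 : Int) ^ (C.n - i)) = (C.V (p + i) : Int) := by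
  obtain ⟨hlen, hds, hvds⟩ := pvDsFacts C p
  have e1 : ((10 : Int) ^ (C.n - i)) = ((10 ^ (C.n - i) : Nat) : Int) := by norm_cast
  rw [e1, PySem.Int.floordiv_natCast]
  have emod : PySem.Int.mod (C.V p : Int) ((10 ^ (C.n - i) : Nat) : Int)
      = ((C.V p % 10 ^ (C.n - i) : Nat) : Int) := by
    exact_mod_cast PySem.Int.mod_natCast (C.V p) (10 ^ (C.n - i))
  rw [emod]
  have hsplit := pvVn_split (C.cs.rotate p) hds i (by omega)
  rw [hlen, hvds] at hsplit
  rw [hsplit.1, hsplit.2]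
  have htake : ((C.cs.rotate p).take i).length = i := by
    rw [List.length_take]; omega
  have hval : pvVn ((C.cs.rotate p).drop i) * 10 ^ i + pvVn ((C.cs.rotate p).take i)
      = C.V (p + i) := by
    have := pvVn_append ((C.cs.rotate p).drop i) ((C.cs.rotate p).take i)
    rw [htake] at this
    rw [← this]
    have hrot : (C.cs.rotate p).rotate i = (C.cs.rotate p).drop i ++ (C.cs.rotate p).take i :=
      List.rotate_eq_drop_append_take (by omega)
    unfold PvCtx.V
    rw [← List.rotate_rotate, hrot]
  rw [← hval]
  push_cast
  ring

theorem pvGood_d (C : PvCtx) : C.Good C.d := by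
  refine ⟨pvDig_d C, ?_⟩
  rw [pvV_d C]
  exact C.num_le

theorem pvScanGo (C : PvCtx) (p : Nat) (hp : p < C.d) (hdp : C.dig p ≠ some '0')
    (hle : (C.V p : Int) ≤ C.maxIdx) (qh : Nat) (hqd : qh ≤ C.d) (hg : C.Good qh) :
    ∀ k i, qh - (p + i) = k → 1 ≤ i → i ≤ C.n → p + i ≤ qh →
      (∀ j, 1 ≤ j → j < i → ¬ C.Good (p + j)) →
      (∀ q, p + i ≤ q → q < qh → ¬ C.Good q) →
      pvRotSuccGo (C.V p : Int) C.maxIdx C.n i = (C.V qh : Int) := by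
  have hdn := C.d_le
  have hnn : C.n = C.cs.length := rfl
  intro k
  induction k using Nat.strong_induction_on with
  | _ k ih =>
    intro i hk h1 hin hple hsk hmid
    by_cases hiq : p + i = qh
    · by_cases hlt : i < C.n
      · rw [pvRotSuccGo, if_pos hlt]
        rw [if_pos ((pvDigitTest C p i hlt).2 (by rw [hiq]; exact hg.1))]
        simp only [pvArithVal C p i (le_of_lt hlt), hiq]
        by_cases hvx : (C.V qh : Int) = (C.V p : Int)
        · rw [if_pos hvx]
          exact hvx.symm
        · rw [if_neg hvx, if_pos ⟨by exact_mod_cast pvV_pos C qh hg.1, hg.2⟩]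
      · have hieq : i = C.n := by omega
        have hp0 : p = 0 := by omega
        have hqn : qh = C.d := by omega
        rw [pvRotSuccGo, if_neg (by omega)]
        rw [hp0, hqn, pvV_zero C, pvV_d C]
    · -- p + i < qh
      have hiq' : p + i < qh := by omega
      have hlt : i < C.n := by omega
      rw [pvRotSuccGo, if_pos hlt]
      have hnotgood : ¬ C.Good (p + i) := hmid (p + i) (le_refl _) hiq'
      by_cases hdz : C.dig (p + i) = some '0'
      · rw [if_neg (fun ht => ((pvDigitTest C p i hlt).1 ht) hdz)]
        exact ih (qh - (p + i + 1)) (by omega) (i + 1) rfl (by omega) (by omega) (by omega)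
          (fun j hj1 hj2 => by
            rcases Nat.lt_or_ge j i with hji | hji
            · exact hsk j hj1 hji
            · have : j = i := by omega
              subst this
              exact hnotgood)
          (fun q hq1 hq2 => hmid q (by omega) hq2)
      · rw [if_pos ((pvDigitTest C p i hlt).2 hdz)]
        simp only [pvArithVal C p i (le_of_lt hlt)]
        have hvx : ¬ ((C.V (p + i) : Int) = (C.V p : Int)) := by
          intro e
          have hV : C.V (p + i) = C.V p := by exact_mod_cast e
          have hrot := pvV_inj C (p + i) p hdz hdp hV
          have h1' : C.cs.rotate ((p + i) % C.d) = C.cs.rotate p := by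
            rw [← pvRot_reduce]; exact hrot
          have : (p + i) % C.d = p := by
            apply pvRot_inj C _ _ (Nat.mod_lt _ (by omega)) hp h1'
          rw [Nat.mod_eq_of_lt (by omega : p + i < C.d)] at this
          omega
        rw [if_neg hvx]
        have hcond : ¬ (1 ≤ (C.V (p + i) : Int) ∧ (C.V (p + i) : Int) ≤ C.maxIdx) := by
          intro ⟨_, hle2⟩
          exact hnotgood ⟨hdz, hle2⟩
        rw [if_neg hcond]
        exact ih (qh - (p + i + 1)) (by omega) (i + 1) rfl (by omega) (by omega) (by omega)
          (fun j hj1 hj2 => by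
            rcases Nat.lt_or_ge j i with hji | hji
            · exact hsk j hj1 hji
            · have : j = i := by omega
              subst this
              exact hnotgood)
          (fun q hq1 hq2 => hmid q (by omega) hq2)

def pvLeastGood (C : PvCtx) (p : Nat) : Nat :=
  (((List.range' (p + 1) (C.d - p)).find? (fun j => C.goodB j)).getD C.d)

theorem pvFind?_range' (P : Nat → Bool) : ∀ k s j, (List.range' s k).find? P = some j →
    P j = true ∧ s ≤ j ∧ j < s + k ∧ ∀ q, s ≤ q → q < j → P q = false := by
  intro k
  induction k with
  | zero => intro s j h; simp [List.range'_zero] at h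
  | succ k ihk =>
    intro s j h
    rw [List.range'_succ, List.find?_cons] at h
    cases hs : P s with
    | true =>
      rw [hs] at h
      simp only [] at h
      injection h with h
      subst h
      exact ⟨hs, le_refl _, by omega, fun q h1 h2 => by omega⟩
    | false =>
      rw [hs] at h
      simp only [] at h
      obtain ⟨hP, h1, h2, h3⟩ := ihk (s + 1) j h
      refine ⟨hP, by omega, by omega, fun q hq1 hq2 => ?_⟩
      rcases Nat.eq_or_lt_of_le hq1 with he | hlt
      · rw [← he]; exact hs
      · exact h3 q (by omega) hq2

theorem pvLeastGood_spec (C : PvCtx) (p : Nat) (hp : p < C.d) :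
    p < pvLeastGood C p ∧ pvLeastGood C p ≤ C.d ∧ C.Good (pvLeastGood C p) ∧
      ∀ q, p < q → q < pvLeastGood C p → ¬ C.Good q := by
  unfold pvLeastGood
  cases hfind : (List.range' (p + 1) (C.d - p)).find? (fun j => C.goodB j) with
  | none =>
    exfalso
    rw [List.find?_eq_none] at hfind
    refine hfind C.d ?_ (by simp [pvGood_d C])
    rw [List.mem_range'_1]
    omega
  | some j =>
    obtain ⟨hP, h1, h2, h3⟩ := pvFind?_range' _ _ _ _ hfind
    simp only [Option.getD_some]
    refine ⟨by omega, by omega, by simpa using hP, fun q hq1 hq2 => ?_⟩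
    have := h3 q (by omega) hq2
    rw [← pvGoodB_iff]
    simp [this]

theorem pvScan_eq (C : PvCtx) (p : Nat) (hp : p < C.d) (hdp : C.dig p ≠ some '0')
    (hle : (C.V p : Int) ≤ C.maxIdx) :
    pvRotSucc (C.V p : Int) C.maxIdx = (C.V (pvLeastGood C p) : Int) := by
  obtain ⟨hq1, hq2, hq3, hq4⟩ := pvLeastGood_spec C p hp
  have hchars : PySem.Int.toChars (C.V p : Int) = C.cs.rotate p := by
    rw [pvToChars_eq _ (by positivity)]
    have : ((C.V p : Int)).toNat = C.V p := rfl
    rw [this]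
    obtain ⟨c, t, e, _, hc, _, hdg⟩ := pvRot_cons C p
    have hc0 : c ≠ '0' := fun h => hdp (h ▸ hdg)
    exact pvRep_vn _ (pvRot_ne C p) (pvRot_digs C p) (by rw [e]; simpa using hc0)
  unfold pvRotSucc
  rw [hchars, List.length_rotate]
  have hnn : C.cs.length = C.n := rfl
  rw [hnn]
  exact pvScanGo C p hp hdp hle (pvLeastGood C p) hq2 hq3 (pvLeastGood C p - (p + 1)) 1 rfl
    (le_refl _) (pvN_pos C) (by omega) (fun j h1 h2 => by omega)
    (fun q h1 h2 => hq4 q (by omega) h2)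

def pvChainSpec (maxIdx num : Int) : Int → List Int → Prop
  | cur, [] => pvRotSucc cur maxIdx = num
  | cur, r :: rest => pvRotSucc cur maxIdx = r ∧ pvChainSpec maxIdx num r rest

def pvGoodsBetween (C : PvCtx) (p : Nat) : List Int :=
  ((List.range' (p + 1) (C.d - 1 - p)).filter (fun j => C.goodB j)).map
    (fun j => (C.V j : Int))

theorem pvGoodsBetween_split (C : PvCtx) (p : Nat) (hp : p < C.d) :
    (pvLeastGood C p = C.d ∧ pvGoodsBetween C p = []) ∨
    (pvLeastGood C p < C.d ∧
      pvGoodsBetween C p = (C.V (pvLeastGood C p) : Int) :: pvGoodsBetween C (pvLeastGood C p)) := by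
  obtain ⟨hq1, hq2, hq3, hq4⟩ := pvLeastGood_spec C p hp
  set q := pvLeastGood C p with hqdef
  rcases Nat.eq_or_lt_of_le hq2 with he | hlt
  · left
    refine ⟨he, ?_⟩
    unfold pvGoodsBetween
    rw [List.filter_eq_nil_iff.2, List.map_nil]
    intro j hj
    rw [List.mem_range'_1] at hj
    simp only [pvGoodB_iff]
    exact hq4 j (by omega) (by omega)
  · right
    refine ⟨hlt, ?_⟩
    unfold pvGoodsBetween
    have hsplit : List.range' (p + 1) (C.d - 1 - p)
        = List.range' (p + 1) (q - p - 1) ++ List.range' q (1 + (C.d - 1 - q)) := by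
      have hap := List.range'_append_1 (s := p + 1) (m := q - p - 1) (n := 1 + (C.d - 1 - q))
      rw [show (p + 1) + (q - p - 1) = q from by omega,
        show (q - p - 1) + (1 + (C.d - 1 - q)) = C.d - 1 - p from by omega] at hap
      exact hap.symm
    rw [hsplit, List.filter_append]
    have h1 : (List.range' (p + 1) (q - p - 1)).filter (fun j => C.goodB j) = [] := by
      rw [List.filter_eq_nil_iff]
      intro j hj
      rw [List.mem_range'_1] at hj
      simp only [pvGoodB_iff]
      exact hq4 j (by omega) (by omega)
    have h2 : List.range' q (1 + (C.d - 1 - q)) = q :: List.range' (q + 1) (C.d - 1 - q) := by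
      rw [Nat.add_comm, List.range'_succ]
    rw [h1, h2, List.filter_cons_of_pos (by simp only [pvGoodB_iff]; exact hq3),
      List.nil_append, List.map_cons]

theorem pvChainSpec_step (C : PvCtx) : ∀ k p, C.d - p = k → p < C.d → C.dig p ≠ some '0' →
    (C.V p : Int) ≤ C.maxIdx →
    pvChainSpec C.maxIdx (C.num : Int) (C.V p : Int) (pvGoodsBetween C p) := by
  intro k
  induction k using Nat.strong_induction_on with
  | _ k ih =>
    intro p hk hp hdp hle
    rcases pvGoodsBetween_split C p hp with ⟨he, hnil⟩ | ⟨hlt, hcons⟩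
    · rw [hnil]
      unfold pvChainSpec
      rw [pvScan_eq C p hp hdp hle, he, pvV_d C]
    · rw [hcons]
      obtain ⟨hq1, hq2, hq3, hq4⟩ := pvLeastGood_spec C p hp
      refine ⟨pvScan_eq C p hp hdp hle, ?_⟩
      exact ih (C.d - pvLeastGood C p) (by omega) (pvLeastGood C p) rfl hlt hq3.1 hq3.2

theorem pvChainSpec_holds (C : PvCtx) :
    pvChainSpec C.maxIdx (C.num : Int) (C.num : Int)
      (pvGenRotationsInRange (C.num : Int) 1 C.maxIdx) := by
  have e : pvGenRotationsInRange (C.num : Int) 1 C.maxIdx = pvGoodsBetween C 0 := by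
    rw [pvChainList_eq C]
    unfold pvGoodsBetween
    norm_num
  rw [e]
  have h0 := pvChainSpec_step C C.d 0 (by omega) (by have := C.d_pos; omega) (pvDig_zero C)
    (by rw [pvV_zero C]; exact C.num_le)
  rw [pvV_zero C] at h0
  exact h0

def pvEntry (a : List Int) (t : Nat) : Int := a.getD t 0

theorem pvEntry_set_ne (a : List Int) (i t : Nat) (v : Int) (h : i ≠ t) :
    pvEntry (a.set i v) t = pvEntry a t := by
  unfold pvEntry
  rw [List.getD_eq_getElem?_getD, List.getD_eq_getElem?_getD, List.getElem?_set_ne h]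

theorem pvEntry_set_self (a : List Int) (i : Nat) (v : Int) (h : i < a.length) :
    pvEntry (a.set i v) i = v := by
  unfold pvEntry
  rw [List.getD_eq_getElem?_getD, List.getElem?_set_self h]
  rfl

theorem pvChainFold (maxIdx num : Int) (R : List Int) (hnum : 1 ≤ num) (hnum2 : num ≤ maxIdx) :
    (∀ r ∈ R, 1 ≤ r ∧ r ≤ maxIdx) →
    ∀ (a : List Int) (cur : Int), pvChainSpec maxIdx num cur R →
    1 ≤ cur → cur ≤ maxIdx →
    a.length = (maxIdx + 1).toNat →
    pvEntry a 0 = 0 →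
    (∀ t : Nat, pvEntry a t ≠ 0 → 1 ≤ t ∧ pvEntry a t = pvRotSucc (t : Int) maxIdx) →
    (pvEntry a num.toNat ≠ 0 ∨ cur = num) →
    (∀ t : Nat, pvEntry a t ≠ 0 →
      pvEntry (R.foldl (fun (st : List Int × Int) nxt => (st.1.set st.2.toNat nxt, nxt)) (a, cur)).1 t ≠ 0) ∧
    ((R.foldl (fun (st : List Int × Int) nxt => (st.1.set st.2.toNat nxt, nxt)) (a, cur)).1.length = (maxIdx + 1).toNat ∧
     pvEntry (R.foldl (fun (st : List Int × Int) nxt => (st.1.set st.2.toNat nxt, nxt)) (a, cur)).1 0 = 0 ∧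
     (∀ t : Nat, pvEntry (R.foldl (fun (st : List Int × Int) nxt => (st.1.set st.2.toNat nxt, nxt)) (a, cur)).1 t ≠ 0 →
        1 ≤ t ∧ pvEntry (R.foldl (fun (st : List Int × Int) nxt => (st.1.set st.2.toNat nxt, nxt)) (a, cur)).1 t = pvRotSucc (t : Int) maxIdx) ∧
     (pvEntry (R.foldl (fun (st : List Int × Int) nxt => (st.1.set st.2.toNat nxt, nxt)) (a, cur)).1 num.toNat ≠ 0 ∨
        (R.foldl (fun (st : List Int × Int) nxt => (st.1.set st.2.toNat nxt, nxt)) (a, cur)).2 = num) ∧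
     1 ≤ (R.foldl (fun (st : List Int × Int) nxt => (st.1.set st.2.toNat nxt, nxt)) (a, cur)).2 ∧
     (R.foldl (fun (st : List Int × Int) nxt => (st.1.set st.2.toNat nxt, nxt)) (a, cur)).2 ≤ maxIdx ∧
     pvRotSucc (R.foldl (fun (st : List Int × Int) nxt => (st.1.set st.2.toNat nxt, nxt)) (a, cur)).2 maxIdx = num) := by
  induction R with
  | nil =>
    intro _ a cur hchain h1 h2 hlen h0 hspec hnz
    exact ⟨fun t h => h, hlen, h0, hspec, hnz, h1, h2, hchain⟩
  | cons r R' ih =>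
    intro hR a cur hchain h1 h2 hlen h0 hspec hnz
    obtain ⟨hr1, hr2⟩ := hR r (by simp)
    obtain ⟨hsucc, hchain'⟩ := hchain
    have hcurlt : cur.toNat < a.length := by rw [hlen]; omega
    set a' := a.set cur.toNat r with ha'
    have hlen' : a'.length = (maxIdx + 1).toNat := by rw [ha', List.length_set, hlen]
    have h0' : pvEntry a' 0 = 0 := by
      rw [ha', pvEntry_set_ne _ _ _ _ (by omega)]; exact h0
    have hcurv : ((cur.toNat : Nat) : Int) = cur := by omega
    have hspec' : ∀ t : Nat, pvEntry a' t ≠ 0 → 1 ≤ t ∧ pvEntry a' t = pvRotSucc (t : Int) maxIdx := by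
      intro t ht
      by_cases he : cur.toNat = t
      · subst he
        rw [ha', pvEntry_set_self _ _ _ hcurlt]
        refine ⟨by omega, ?_⟩
        rw [hcurv, ← hsucc]
      · rw [ha', pvEntry_set_ne _ _ _ _ he] at ht ⊢
        exact hspec t ht
    have hnz' : pvEntry a' num.toNat ≠ 0 ∨ r = num := by
      rcases hnz with hnz | hcur
      · left
        by_cases he : cur.toNat = num.toNat
        · rw [ha', he, pvEntry_set_self _ _ _ (by omega)]; omega
        · rw [ha', pvEntry_set_ne _ _ _ _ he]; exact hnz
      · left
        rw [ha', hcur, pvEntry_set_self _ _ _ (by rw [hlen]; omega)]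
        omega
    have hpres : ∀ t : Nat, pvEntry a t ≠ 0 → pvEntry a' t ≠ 0 := by
      intro t ht
      by_cases he : cur.toNat = t
      · subst he; rw [ha', pvEntry_set_self _ _ _ hcurlt]; omega
      · rw [ha', pvEntry_set_ne _ _ _ _ he]; exact ht
    have hmain := ih (fun x hx => hR x (by simp [hx])) a' r hchain' hr1 hr2 hlen' h0' hspec' hnz'
    simp only [List.foldl_cons]
    exact ⟨fun t ht => hmain.1 t (hpres t ht), hmain.2⟩

def pvInv (maxIdx : Int) (j : Int) (a : List Int) : Prop :=
  a.length = (maxIdx + 1).toNat ∧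
  pvEntry a 0 = 0 ∧
  (∀ t : Nat, pvEntry a t ≠ 0 → 1 ≤ t ∧ pvEntry a t = pvRotSucc (t : Int) maxIdx) ∧
  (∀ t : Nat, 1 ≤ t → (t : Int) ≤ j → pvEntry a t ≠ 0)

theorem pvStep (maxIdx j : Int) (a : List Int) (hj : 0 ≤ j) (hj2 : j + 1 ≤ maxIdx)
    (h : pvInv maxIdx j a) :
    pvInv maxIdx (j + 1)
      ((fun a num =>
        if PySem.List.pyGetD a num 0 > 0 then a
        else
          let st := (pvGenRotationsInRange num 1 maxIdx).foldl
            (fun (st : List Int × Int) nxt => (st.1.set st.2.toNat nxt, nxt)) (a, num)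
          st.1.set st.2.toNat num) a (j + 1)) := by
  obtain ⟨hlen, h0, hspec, hnz⟩ := h
  have hnum1 : (1 : Int) ≤ j + 1 := by omega
  have hget : PySem.List.pyGetD a (j + 1) 0 = pvEntry a (j + 1).toNat := by
    rw [PySem.List.pyGetD_of_nonneg _ _ (by omega)]; rfl
  by_cases hpos : PySem.List.pyGetD a (j + 1) 0 > 0
  · simp only [if_pos hpos]
    refine ⟨hlen, h0, hspec, fun t ht1 ht2 => ?_⟩
    rcases Int.lt_or_le (t : Int) (j + 1) with hc | hc
    · exact hnz t ht1 (by omega)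
    · have : t = (j + 1).toNat := by omega
      subst this
      rw [← hget]
      omega
  · simp only [if_neg hpos]
    have hch : PySem.Int.toChars (j + 1) = pvRep (j + 1).toNat := pvToChars_eq _ (by omega)
    obtain ⟨C, hcs, hmax⟩ := pvCtx_exists (PySem.Int.toChars (j + 1)) maxIdx
      (by rw [hch]; exact pvRep_ne_nil _)
      (by rw [hch]; exact pvRep_digs _)
      (by rw [hch]; exact pvRep_head _ (by omega))
      (by rw [hch, pvVn_rep]; omega)
    have hCnum : (C.num : Int) = j + 1 := by
      unfold PvCtx.num
      rw [hcs, hch, pvVn_rep]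
      omega
    have hChain := pvChainSpec_holds C
    rw [hCnum, hmax] at hChain
    have hlist := pvChainList_eq C
    rw [hCnum, hmax] at hlist
    have hRbound : ∀ r ∈ pvGenRotationsInRange (j + 1) 1 maxIdx, 1 ≤ r ∧ r ≤ maxIdx := by
      rw [hlist]
      intro r hr
      rw [List.mem_map] at hr
      obtain ⟨q, hq, rfl⟩ := hr
      rw [List.mem_filter] at hq
      have hgood : C.Good q := by simpa using hq.2
      exact ⟨by exact_mod_cast pvV_pos C q hgood.1, by rw [← hmax]; exact hgood.2⟩
    have hmain := pvChainFold maxIdx (j + 1) _ hnum1 hj2 hRbound a (j + 1) hChain hnum1 hj2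
      hlen h0 hspec (Or.inr rfl)
    obtain ⟨hpres, hlen', h0', hspec', hnz', hcur1, hcur2, hsucc⟩ := hmain
    set st := (pvGenRotationsInRange (j + 1) 1 maxIdx).foldl
      (fun (st : List Int × Int) nxt => (st.1.set st.2.toNat nxt, nxt)) (a, j + 1) with hst
    have hcurlt : st.2.toNat < st.1.length := by rw [hlen']; omega
    have hcurv : ((st.2.toNat : Nat) : Int) = st.2 := by omega
    refine ⟨?_, ?_, ?_, ?_⟩
    · rw [List.length_set, hlen']
    · rw [pvEntry_set_ne _ _ _ _ (by omega)]; exact h0'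
    · intro t ht
      by_cases he : st.2.toNat = t
      · subst he
        rw [pvEntry_set_self _ _ _ hcurlt]
        refine ⟨by omega, ?_⟩
        rw [hcurv, hsucc]
      · rw [pvEntry_set_ne _ _ _ _ he] at ht ⊢
        exact hspec' t ht
    · intro t ht1 ht2
      have hfin : ∀ u : Nat, pvEntry st.1 u ≠ 0 → pvEntry (st.1.set st.2.toNat (j + 1)) u ≠ 0 := by
        intro u hu
        by_cases he : st.2.toNat = u
        · subst he; rw [pvEntry_set_self _ _ _ hcurlt]; omega
        · rw [pvEntry_set_ne _ _ _ _ he]; exact hu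
      rcases Int.lt_or_le (t : Int) (j + 1) with hc | hc
      · exact hfin t (hpres t (hnz t ht1 (by omega)))
      · have hteq : (t : Int) = j + 1 := by omega
        rcases hnz' with hnz' | hcur
        · have : t = (j + 1).toNat := by omega
          subst this
          exact hfin _ hnz'
        · have : st.2.toNat = t := by omega
          subst this
          rw [pvEntry_set_self _ _ _ hcurlt]
          omega

theorem pvEntry_replicate (k t : Nat) : pvEntry (List.replicate k (0 : Int)) t = 0 := by
  unfold pvEntry
  rw [List.getD_eq_getElem?_getD, List.getElem?_replicate]
  split <;> rfl

theorem pvRange_nil (a b : Int) (h : b ≤ a) : PySem.List.pyRange a b = [] := by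
  unfold PySem.List.pyRange
  rw [if_neg (by norm_num)]
  simp only [show (0:Int) < 1 from by norm_num, if_true, if_neg (by omega : ¬ a < b)]
  simp

theorem pvInv_init (maxIdx : Int) : pvInv maxIdx 0 (List.replicate (maxIdx + 1).toNat 0) := by
  refine ⟨by rw [List.length_replicate], pvEntry_replicate _ _, ?_, ?_⟩
  · intro t ht; exact absurd (pvEntry_replicate _ t) ht
  · intro t ht1 ht2; omega

theorem pvFinal (max_idx : Int) : pvInv max_idx max_idx
    ((PySem.List.pyRange 1 (max_idx + 1)).foldl (fun a num =>
      if PySem.List.pyGetD a num 0 > 0 then a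
      else
        let st := (pvGenRotationsInRange num 1 max_idx).foldl
          (fun (st : List Int × Int) nxt => (st.1.set st.2.toNat nxt, nxt)) (a, num)
        st.1.set st.2.toNat num) (List.replicate (max_idx + 1).toNat 0)) := by
  by_cases hm : max_idx ≤ 0
  · rw [pvRange_nil 1 (max_idx + 1) (by omega), List.foldl_nil]
    obtain ⟨h1, h2, h3, _⟩ := pvInv_init max_idx
    exact ⟨h1, h2, h3, fun t ht1 ht2 => by omega⟩
  · have H : ∀ t : Nat, (t : Int) ≤ max_idx → pvInv max_idx t
        ((PySem.List.pyRange 1 ((t : Int) + 1)).foldl (fun a num =>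
          if PySem.List.pyGetD a num 0 > 0 then a
          else
            let st := (pvGenRotationsInRange num 1 max_idx).foldl
              (fun (st : List Int × Int) nxt => (st.1.set st.2.toNat nxt, nxt)) (a, num)
          st.1.set st.2.toNat num) (List.replicate (max_idx + 1).toNat 0)) := by
      intro t
      induction t with
      | zero =>
        intro _
        rw [show ((0 : Nat) : Int) + 1 = 1 from by norm_num, pvRange_nil 1 1 (le_refl _),
          List.foldl_nil]
        exact pvInv_init max_idx
      | succ t iht =>
        intro hle
        have hle' : (t : Int) ≤ max_idx := by push_cast at hle ⊢; omega
        have e1 : ((t + 1 : Nat) : Int) + 1 = ((t : Int) + 1) + 1 := by push_cast; ring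
        rw [e1, PySem.List.pyRange_one_succ_right (by omega), List.foldl_append, List.foldl_cons,
          List.foldl_nil]
        have := pvStep max_idx (t : Int) _ (by omega) (by push_cast at hle; omega) (iht hle')
        have e2 : ((t + 1 : Nat) : Int) = (t : Int) + 1 := by push_cast; ring
        rw [e2]
        exact this
    have := H max_idx.toNat (by omega)
    rw [show ((max_idx.toNat : Nat) : Int) = max_idx from by omega] at this
    exact this

theorem pvRange_zero_len (b : Int) : (PySem.List.pyRange 0 b).length = b.toNat := by
  by_cases h : b ≤ 0
  · rw [pvRange_nil 0 b h]
    simp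
    omega
  · have : b = (b.toNat : Int) := by omega
    rw [this, PySem.List.pyRange_zero_natCast]
    simp
    omega

theorem pvRange_zero_get (b : Int) (i : Nat) (h : i < (PySem.List.pyRange 0 b).length) :
    (PySem.List.pyRange 0 b)[i] = (i : Int) := by
  have hb : b = (b.toNat : Int) := by
    by_contra hb
    have hneg : b ≤ 0 := by omega
    rw [pvRange_nil 0 b hneg] at h
    simp at h
  have e : PySem.List.pyRange 0 b = List.map (fun k : Nat => (k : Int)) (List.range b.toNat) := by
    rw [hb]
    exact PySem.List.pyRange_zero_natCast _
  simp [e]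

theorem pvEntry_eq_getElem (a : List Int) (t : Nat) (h : t < a.length) :
    pvEntry a t = a[t] := by
  unfold pvEntry
  rw [List.getD_eq_getElem?_getD, List.getElem?_eq_getElem h]
  rfl

theorem pvBuildEq (max_idx : Int) : build_tab max_idx = build_tab_alt max_idx := by
  obtain ⟨hlen, h0, hspec, hnz⟩ := pvFinal max_idx
  unfold build_tab build_tab_alt
  apply List.ext_getElem
  · simp only [List.length_map, pvRange_zero_len]
    rw [hlen]
  · intro idx h1 h2
    rw [List.getElem_map, pvRange_zero_get _ _ (by simpa using h2)]
    have hidx : idx < (max_idx + 1).toNat := by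
      rw [← hlen]; exact h1
    rw [← pvEntry_eq_getElem _ _ h1]
    by_cases hz : idx = 0
    · subst hz
      rw [h0, if_neg (by norm_num)]
    · have ht1 : 1 ≤ idx := by omega
      have ht2 : (idx : Int) ≤ max_idx := by omega
      have hne := hnz idx ht1 ht2
      rw [(hspec idx hne).2, if_pos (by exact_mod_cast ht1)]

-- ===== VERDICT (by name: the statement is the Claim_ definition above) =====
theorem build_tab_spec : Claim_equal_build_tab := by
  intro max_idx _hdom
  exact pvBuildEq max_idx
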